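-- pv_equiv track=rewrite | github.com/Coding-Club-0/Code-Quest-Practice | Hard/Network Ranger.py | andStrings
-- ===== SOURCE A (Python) =====
-- def andStrings(str1, str2):
--     output = ""
--     for i in range(len(str1)):
--         if str1[i] == "1" and str2[i] == "1": output += "1"
--         else: output += "0"
--     ipAddress = ""
--     for i in range(0, len(output), 8):
--         integer = int(output[i:i+8], 2)
--         ipAddress += str(integer) + "."
--     return ipAddress[:-1]
-- ===== SOURCE B (Python) =====
-- def andStrings(str1, str2):
--     octets = []
--     acc = 0
--     cnt = 0
--     for i in range(len(str1)):
--         acc = acc * 2 + (1 if str1[i] == "1" and str2[i] == "1" else 0)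
--         cnt += 1
--         if cnt == 8:
--             octets.append(acc)
--             acc = 0
--             cnt = 0
--     if cnt != 0:
--         octets.append(acc)
--     return ".".join(str(x) for x in octets)
-- ===== Notes on version B (the rewrite author's own statement) =====
-- stated objective: alternative
-- what changed: Replaces A's two passes (build an intermediate AND string, then slice it into 8-char chunks parsed with int(s,2)) by one combined scan that accumulates each octet arithmetically (acc = acc*2 + bit) and flushes it every 8 bits, joining the octets at the end; no intermediate string and no base-2 string parsing.
import Mathlib
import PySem

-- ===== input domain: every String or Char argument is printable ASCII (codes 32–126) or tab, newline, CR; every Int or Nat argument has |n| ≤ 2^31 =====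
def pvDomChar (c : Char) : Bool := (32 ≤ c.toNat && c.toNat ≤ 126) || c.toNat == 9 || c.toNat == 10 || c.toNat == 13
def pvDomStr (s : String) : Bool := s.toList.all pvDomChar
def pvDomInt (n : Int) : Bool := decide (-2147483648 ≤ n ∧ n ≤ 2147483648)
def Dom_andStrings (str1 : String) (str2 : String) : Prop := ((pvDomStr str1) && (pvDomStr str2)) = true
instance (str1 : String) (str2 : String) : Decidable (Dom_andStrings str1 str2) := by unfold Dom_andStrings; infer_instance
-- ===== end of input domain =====

-- B replaces A's two passes (intermediate AND string, then 8-char slices parsed with int(s,2)) by one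
-- combined scan that builds each octet arithmetically and flushes it every 8 bits (objective: alternative).

-- ===== PORT A =====
def andStrings (str1 : String) (str2 : String) : String :=
  let l1 := str1.toList
  let l2 := str2.toList
  -- for i in range(len(str1)): output += "1" / "0"  (str2[i] raises outside Pre_; pyGetD default ' ' never equals '1')
  let output : List Char := (List.range l1.length).foldl
    (fun acc (i : Nat) =>
      if PySem.List.pyGetD l1 (i : Int) ' ' = '1' ∧ PySem.List.pyGetD l2 (i : Int) ' ' = '1'
      then acc ++ ['1'] else acc ++ ['0']) []
  -- for i in range(0, len(output), 8): ipAddress += str(int(output[i:i+8], 2)) + "."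
  let ipAddress : List Char := (PySem.List.pyRange 0 (output.length : Int) 8).foldl
    (fun acc i =>
      let integer : Int := (PySem.Int.ofCharsBase? (PySem.List.slice output (some i) (some (i + 8))) 2).getD 0
      acc ++ (PySem.Int.toChars integer ++ ['.'])) []
  String.ofList (PySem.List.slice ipAddress none (some (-1)))

-- ===== PORT B =====
def andStrings_alt (str1 : String) (str2 : String) : String :=
  let l1 := str1.toList
  let l2 := str2.toList
  -- one scan: acc = acc*2 + bit; flush every 8 bits; state = (octets, acc, cnt)
  let st := (List.range l1.length).foldl
    (fun (st : List Int × Int × Nat) (i : Nat) =>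
      let acc' := st.2.1 * 2 +
        (if PySem.List.pyGetD l1 (i : Int) ' ' = '1' ∧ PySem.List.pyGetD l2 (i : Int) ' ' = '1'
         then 1 else 0)
      let cnt' := st.2.2 + 1
      if cnt' = 8 then (st.1 ++ [acc'], 0, 0) else (st.1, acc', cnt'))
    (([] : List Int), (0 : Int), (0 : Nat))
  let octets := if st.2.2 ≠ 0 then st.1 ++ [st.2.1] else st.1
  String.ofList (PySem.Chars.join ['.'] (octets.map PySem.Int.toChars))

-- ===== PRECONDITION & SPEC =====
-- Pre_ excludes exactly the inputs on which A raises IndexError: a position where str1 holds '1'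
-- but str2 is too short to be indexed there (the `and` short-circuits on every other character).
def Pre_andStrings (str1 : String) (str2 : String) : Prop :=
  ∀ i : Fin str1.toList.length, str1.toList.get i = '1' → (i : Nat) < str2.toList.length
instance (str1 : String) (str2 : String) : Decidable (Pre_andStrings str1 str2) := by
  unfold Pre_andStrings; infer_instance

def pvWitness_andStrings : String × String := ("1100000010101000", "1111111100000000")

def Spec_andStrings (str1 : String) (str2 : String) (out : String) : Prop := out = andStrings_alt str1 str2
instance (str1 : String) (str2 : String) (out : String) : Decidable (Spec_andStrings str1 str2 out) := by
  unfold Spec_andStrings; infer_instance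

-- ===== CLAIM (what is proved, stated in full; the proofs are below) =====
def Claim_equal_andStrings : Prop := ∀ (str1 : String) (str2 : String), Dom_andStrings str1 str2 → Pre_andStrings str1 str2 → Spec_andStrings str1 str2 (andStrings str1 str2)

-- ===== LEMMAS AND PROOFS =====

-- the AND bit at position i, and its character / the base-2 value of a bit list
def pvBit (l1 l2 : List Char) (i : Nat) : Int :=
  if PySem.List.pyGetD l1 (i : Int) ' ' = '1' ∧ PySem.List.pyGetD l2 (i : Int) ' ' = '1' then 1 else 0

def pvBits (l1 l2 : List Char) : List Int := (List.range l1.length).map (pvBit l1 l2)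

def toBitChar (b : Int) : Char := if b == 1 then '1' else '0'

def bitVal (l : List Int) : Int := l.foldl (fun a b => 2 * a + b) 0

-- all 8-blocks (A's slicing / B's flushing agree on these)
def chunks8 (l : List Int) : List (List Int) :=
  if l = [] then [] else l.take 8 :: chunks8 (l.drop 8)
termination_by l.length
decreasing_by
  rename_i h
  have := List.length_pos_of_ne_nil h
  simp only [List.length_drop]
  omega

def fullChunks (l : List Int) : List (List Int) :=
  if l.length < 8 then [] else l.take 8 :: fullChunks (l.drop 8)
termination_by l.length
decreasing_by
  simp only [List.length_drop]
  omega

def rem8 (l : List Int) : List Int :=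
  if l.length < 8 then l else rem8 (l.drop 8)
termination_by l.length
decreasing_by
  simp only [List.length_drop]
  omega

def stepB (st : List Int × Int × Nat) (b : Int) : List Int × Int × Nat :=
  let acc' := st.2.1 * 2 + b
  let cnt' := st.2.2 + 1
  if cnt' = 8 then (st.1 ++ [acc'], 0, 0) else (st.1, acc', cnt')

lemma pvBit_cases (l1 l2 : List Char) (i : Nat) : pvBit l1 l2 i = 0 ∨ pvBit l1 l2 i = 1 := by
  unfold pvBit; split_ifs <;> simp

lemma pvBits_cases (l1 l2 : List Char) : ∀ b ∈ pvBits l1 l2, b = 0 ∨ b = 1 := by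
  intro b hb
  obtain ⟨i, _, rfl⟩ := List.mem_map.mp hb
  exact pvBit_cases l1 l2 i

lemma bitVal_concat (p : List Int) (b : Int) : bitVal (p ++ [b]) = 2 * bitVal p + b := by
  simp [bitVal, List.foldl_append]

-- int(s, 2) on a nonempty string of at most 8 bit characters
lemma parse1 (a : Int) (ha : a = 0 ∨ a = 1) :
    PySem.Int.ofCharsBase? ([a].map toBitChar) 2 = some (bitVal [a]) := by
  rcases ha with rfl | rfl <;> decide

lemma parse2 (a b : Int) (ha : a = 0 ∨ a = 1) (hb : b = 0 ∨ b = 1) :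
    PySem.Int.ofCharsBase? ([a,b].map toBitChar) 2 = some (bitVal [a,b]) := by
  rcases ha with rfl | rfl <;> rcases hb with rfl | rfl <;> decide

lemma parse3 (a b c : Int) (ha : a = 0 ∨ a = 1) (hb : b = 0 ∨ b = 1) (hc : c = 0 ∨ c = 1) :
    PySem.Int.ofCharsBase? ([a,b,c].map toBitChar) 2 = some (bitVal [a,b,c]) := by
  rcases ha with rfl | rfl <;> rcases hb with rfl | rfl <;> rcases hc with rfl | rfl <;> decide

lemma parse4 (a b c d : Int) (ha : a = 0 ∨ a = 1) (hb : b = 0 ∨ b = 1) (hc : c = 0 ∨ c = 1)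
    (hd : d = 0 ∨ d = 1) :
    PySem.Int.ofCharsBase? ([a,b,c,d].map toBitChar) 2 = some (bitVal [a,b,c,d]) := by
  rcases ha with rfl | rfl <;> rcases hb with rfl | rfl <;> rcases hc with rfl | rfl <;>
    rcases hd with rfl | rfl <;> decide

lemma parse5 (a b c d e : Int) (ha : a = 0 ∨ a = 1) (hb : b = 0 ∨ b = 1) (hc : c = 0 ∨ c = 1)
    (hd : d = 0 ∨ d = 1) (he : e = 0 ∨ e = 1) :
    PySem.Int.ofCharsBase? ([a,b,c,d,e].map toBitChar) 2 = some (bitVal [a,b,c,d,e]) := by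
  rcases ha with rfl | rfl <;> rcases hb with rfl | rfl <;> rcases hc with rfl | rfl <;>
    rcases hd with rfl | rfl <;> rcases he with rfl | rfl <;> decide

lemma parse6 (a b c d e f : Int) (ha : a = 0 ∨ a = 1) (hb : b = 0 ∨ b = 1) (hc : c = 0 ∨ c = 1)
    (hd : d = 0 ∨ d = 1) (he : e = 0 ∨ e = 1) (hf : f = 0 ∨ f = 1) :
    PySem.Int.ofCharsBase? ([a,b,c,d,e,f].map toBitChar) 2 = some (bitVal [a,b,c,d,e,f]) := by
  rcases ha with rfl | rfl <;> rcases hb with rfl | rfl <;> rcases hc with rfl | rfl <;>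
    rcases hd with rfl | rfl <;> rcases he with rfl | rfl <;> rcases hf with rfl | rfl <;> decide

lemma parse7 (a b c d e f g : Int) (ha : a = 0 ∨ a = 1) (hb : b = 0 ∨ b = 1) (hc : c = 0 ∨ c = 1)
    (hd : d = 0 ∨ d = 1) (he : e = 0 ∨ e = 1) (hf : f = 0 ∨ f = 1) (hg : g = 0 ∨ g = 1) :
    PySem.Int.ofCharsBase? ([a,b,c,d,e,f,g].map toBitChar) 2 = some (bitVal [a,b,c,d,e,f,g]) := by
  rcases ha with rfl | rfl <;> rcases hb with rfl | rfl <;> rcases hc with rfl | rfl <;>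
    rcases hd with rfl | rfl <;> rcases he with rfl | rfl <;> rcases hf with rfl | rfl <;>
    rcases hg with rfl | rfl <;> decide

lemma parse8 (a b c d e f g h : Int) (ha : a = 0 ∨ a = 1) (hb : b = 0 ∨ b = 1) (hc : c = 0 ∨ c = 1)
    (hd : d = 0 ∨ d = 1) (he : e = 0 ∨ e = 1) (hf : f = 0 ∨ f = 1) (hg : g = 0 ∨ g = 1)
    (hh : h = 0 ∨ h = 1) :
    PySem.Int.ofCharsBase? ([a,b,c,d,e,f,g,h].map toBitChar) 2 = some (bitVal [a,b,c,d,e,f,g,h]) := by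
  rcases ha with rfl | rfl <;> rcases hb with rfl | rfl <;> rcases hc with rfl | rfl <;>
    rcases hd with rfl | rfl <;> rcases he with rfl | rfl <;> rcases hf with rfl | rfl <;>
    rcases hg with rfl | rfl <;> rcases hh with rfl | rfl <;> decide

lemma parse_chunk (ch : List Int) (hlen : ch.length ≤ 8) (hne : ch ≠ [])
    (hb : ∀ b ∈ ch, b = 0 ∨ b = 1) :
    PySem.Int.ofCharsBase? (ch.map toBitChar) 2 = some (bitVal ch) := by
  obtain _ | ⟨a, _ | ⟨b, _ | ⟨c, _ | ⟨d, _ | ⟨e, _ | ⟨f, _ | ⟨g, _ | ⟨h, _ | ⟨i, t⟩⟩⟩⟩⟩⟩⟩⟩⟩ := ch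
  · exact absurd rfl hne
  · exact parse1 a (hb a (by simp))
  · exact parse2 a b (hb a (by simp)) (hb b (by simp))
  · exact parse3 a b c (hb a (by simp)) (hb b (by simp)) (hb c (by simp))
  · exact parse4 a b c d (hb a (by simp)) (hb b (by simp)) (hb c (by simp)) (hb d (by simp))
  · exact parse5 a b c d e (hb a (by simp)) (hb b (by simp)) (hb c (by simp)) (hb d (by simp))
      (hb e (by simp))
  · exact parse6 a b c d e f (hb a (by simp)) (hb b (by simp)) (hb c (by simp)) (hb d (by simp))
      (hb e (by simp)) (hb f (by simp))
  · exact parse7 a b c d e f g (hb a (by simp)) (hb b (by simp)) (hb c (by simp)) (hb d (by simp))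
      (hb e (by simp)) (hb f (by simp)) (hb g (by simp))
  · exact parse8 a b c d e f g h (hb a (by simp)) (hb b (by simp)) (hb c (by simp)) (hb d (by simp))
      (hb e (by simp)) (hb f (by simp)) (hb g (by simp)) (hb h (by simp))
  · simp at hlen; omega

lemma slice_neg_one (l : List Char) : PySem.List.slice l none (some (-1)) = l.dropLast := by
  simp [PySem.List.slice, List.dropLast_eq_take]

lemma pyRange8 (m : Nat) :
    PySem.List.pyRange 0 (m : Int) 8 = (List.range ((m + 7) / 8)).map (fun k => ((8 * k : Nat) : Int)) := by
  rw [PySem.List.pyRange_of_pos 0 (m : Int) (by norm_num)]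
  have hK : (if (0:Int) < (m:Int) then (((m:Int) - 0 + 8 - 1) / 8).toNat else 0) = (m + 7) / 8 := by
    split_ifs with h
    · rw [show ((m:Int) - 0 + 8 - 1) = ((m + 7 : Nat) : Int) by push_cast; ring]
      rw [show ((8:Int)) = ((8:Nat):Int) by norm_num, ← Int.natCast_div, Int.toNat_natCast]
    · have hm : m = 0 := by omega
      subst hm; simp
  rw [hK]
  apply List.map_congr_left
  intro k hk
  push_cast; ring

lemma chunkEq (n : Nat) : ∀ (l : List Int), l.length ≤ n → (∀ b ∈ l, b = 0 ∨ b = 1) →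
    (List.range ((l.length + 7) / 8)).flatMap
      (fun k => PySem.Int.toChars
          ((PySem.Int.ofCharsBase? (((l.map toBitChar).drop (8 * k)).take 8) 2).getD 0) ++ ['.'])
    = (chunks8 l).flatMap (fun ch => PySem.Int.toChars (bitVal ch) ++ ['.']) := by
  induction n with
  | zero =>
    intro l hl _
    have hnil : l = [] := List.eq_nil_of_length_eq_zero (by omega)
    subst hnil
    simp [chunks8]
  | succ n ih =>
    intro l hl hb
    by_cases hnil : l = []
    · subst hnil; simp [chunks8]
    · have hm : 1 ≤ l.length := List.length_pos_of_ne_nil hnil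
      have hK : (l.length + 7) / 8 = (l.length - 1) / 8 + 1 := by omega
      rw [hK, List.range_succ_eq_map, List.flatMap_cons, List.flatMap_map]
      rw [chunks8, if_neg hnil, List.flatMap_cons]
      congr 1
      · have hhead : ((l.map toBitChar).drop (8 * 0)).take 8 = (l.take 8).map toBitChar := by
          simp [List.map_take]
        rw [hhead, parse_chunk (l.take 8) (by simp) (by simp [hnil])
          (fun b hbm => hb b (List.mem_of_mem_take hbm))]
        rfl
      · have htail : ∀ k : Nat,
            ((l.map toBitChar).drop (8 * Nat.succ k)).take 8
              = (((l.drop 8).map toBitChar).drop (8 * k)).take 8 := by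
          intro k
          simp only [← List.map_drop, List.drop_drop]
          congr 3
          omega
        have hfun : (fun k => PySem.Int.toChars
              ((PySem.Int.ofCharsBase? (((l.map toBitChar).drop (8 * Nat.succ k)).take 8) 2).getD 0) ++ ['.'])
            = (fun k => PySem.Int.toChars
              ((PySem.Int.ofCharsBase? ((((l.drop 8).map toBitChar).drop (8 * k)).take 8) 2).getD 0) ++ ['.']) :=
          funext fun k => by rw [htail k]
        rw [hfun]
        have hrec := ih (l.drop 8) (by simp; omega) (fun b hbm => hb b (List.mem_of_mem_drop hbm))
        rw [show ((l.drop 8).length + 7) / 8 = (l.length - 1) / 8 by simp; omega] at hrec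
        exact hrec

lemma dropLast_flatMap_dot {α : Type} (f : α → List Char) (parts : List α) :
    (parts.flatMap (fun p => f p ++ ['.'])).dropLast = PySem.Chars.join ['.'] (parts.map f) := by
  induction parts with
  | nil => simp [PySem.Chars.join, List.intercalate]
  | cons p rest ih =>
    cases rest with
    | nil => simp [PySem.Chars.join, List.intercalate]
    | cons q rest' =>
      rw [List.flatMap_cons]
      rw [List.dropLast_append_of_ne_nil (by simp [List.flatMap_cons])]
      rw [ih]
      simp [PySem.Chars.join, List.intercalate]

lemma A_loop1 (l1 l2 : List Char) :
    (List.range l1.length).foldl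
      (fun acc (i : Nat) =>
        if PySem.List.pyGetD l1 (i : Int) ' ' = '1' ∧ PySem.List.pyGetD l2 (i : Int) ' ' = '1'
        then acc ++ ['1'] else acc ++ ['0']) []
    = (pvBits l1 l2).map toBitChar := by
  rw [pvBits, List.map_map]
  rw [show (fun acc (i : Nat) =>
        if PySem.List.pyGetD l1 (i : Int) ' ' = '1' ∧ PySem.List.pyGetD l2 (i : Int) ' ' = '1'
        then acc ++ ['1'] else acc ++ ['0'])
      = (fun (acc : List Char) i => acc ++ [(toBitChar ∘ pvBit l1 l2) i]) from
    funext fun acc => funext fun i => by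
      show _ = acc ++ [toBitChar (pvBit l1 l2 i)]
      unfold pvBit toBitChar
      by_cases h : PySem.List.pyGetD l1 (i : Int) ' ' = '1' ∧ PySem.List.pyGetD l2 (i : Int) ' ' = '1'
      · rw [if_pos h, if_pos h]; norm_num
      · rw [if_neg h, if_neg h]; norm_num]
  rw [PySem.List.foldl_append_singleton_eq_map, List.nil_append]

lemma A_eq (s1 s2 : String) :
    andStrings s1 s2 =
      String.ofList (PySem.Chars.join ['.']
        ((chunks8 (pvBits s1.toList s2.toList)).map (fun ch => PySem.Int.toChars (bitVal ch)))) := by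
  unfold andStrings
  dsimp only
  rw [A_loop1, slice_neg_one]
  rw [PySem.List.foldl_append_eq_flatMap, List.nil_append]
  rw [List.length_map, pyRange8, List.flatMap_map]
  rw [show (fun k : Nat => PySem.Int.toChars
        ((PySem.Int.ofCharsBase?
          (PySem.List.slice ((pvBits s1.toList s2.toList).map toBitChar)
            (some ((8 * k : Nat) : Int)) (some (((8 * k : Nat) : Int) + 8))) 2).getD 0) ++ ['.'])
      = (fun k : Nat => PySem.Int.toChars
        ((PySem.Int.ofCharsBase?
          ((((pvBits s1.toList s2.toList).map toBitChar).drop (8 * k)).take 8) 2).getD 0) ++ ['.']) from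
    funext fun k => by
      rw [show (((8 * k : Nat) : Int) + 8) = ((8 * k + 8 : Nat) : Int) by push_cast; ring,
        PySem.List.slice_natCast]
      norm_num]
  rw [chunkEq (pvBits s1.toList s2.toList).length _ le_rfl (pvBits_cases _ _)]
  rw [dropLast_flatMap_dot]

lemma foldB (bs : List Int) : ∀ (p o : List Int), p.length < 8 →
    bs.foldl stepB (o, bitVal p, p.length) =
      (o ++ (fullChunks (p ++ bs)).map bitVal, bitVal (rem8 (p ++ bs)), (rem8 (p ++ bs)).length) := by
  induction bs with
  | nil =>
    intro p o hp
    rw [List.append_nil]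
    rw [fullChunks, if_pos hp, rem8, if_pos hp]
    simp
  | cons b bs ih =>
    intro p o hp
    rw [List.foldl_cons]
    have hstep : stepB (o, bitVal p, p.length) b =
        if p.length + 1 = 8 then (o ++ [bitVal (p ++ [b])], 0, 0)
        else (o, bitVal (p ++ [b]), p.length + 1) := by
      have hb2 : bitVal p * 2 + b = bitVal (p ++ [b]) := by rw [bitVal_concat]; ring
      unfold stepB
      dsimp only
      rw [hb2]
    rw [hstep]
    have hassoc : p ++ b :: bs = (p ++ [b]) ++ bs := by simp
    by_cases h8 : p.length + 1 = 8
    · rw [if_pos h8]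
      have hl8 : (p ++ [b]).length = 8 := by simp; omega
      have h0 : ((o ++ [bitVal (p ++ [b])], (0:Int), (0:Nat)) : List Int × Int × Nat)
          = (o ++ [bitVal (p ++ [b])], bitVal ([] : List Int), ([] : List Int).length) := rfl
      rw [h0, ih [] _ (by norm_num), List.nil_append]
      have hfull : fullChunks (p ++ b :: bs) = (p ++ [b]) :: fullChunks bs := by
        rw [fullChunks, if_neg (by simp; omega)]
        rw [hassoc, ← hl8, List.take_left, List.drop_left]
      have hrem : rem8 (p ++ b :: bs) = rem8 bs := by
        rw [rem8, if_neg (by simp; omega)]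
        rw [hassoc, ← hl8, List.drop_left]
      rw [hfull, hrem]
      simp
    · rw [if_neg h8]
      have hlen : (p ++ [b]).length = p.length + 1 := by simp
      rw [show ((o, bitVal (p ++ [b]), p.length + 1) : List Int × Int × Nat)
          = (o, bitVal (p ++ [b]), (p ++ [b]).length) by rw [hlen]]
      rw [ih (p ++ [b]) o (by simp; omega), ← hassoc]

lemma chunks8_eq_full (n : Nat) : ∀ (l : List Int), l.length ≤ n →
    chunks8 l = fullChunks l ++ (if rem8 l = [] then [] else [rem8 l]) := by
  induction n with
  | zero =>
    intro l hl
    have hnil : l = [] := List.eq_nil_of_length_eq_zero (by omega)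
    subst hnil
    simp [chunks8, fullChunks, rem8]
  | succ n ih =>
    intro l hl
    by_cases hnil : l = []
    · subst hnil; simp [chunks8, fullChunks, rem8]
    · rw [chunks8, if_neg hnil]
      by_cases h8 : l.length < 8
      · rw [fullChunks, if_pos h8, rem8, if_pos h8, if_neg hnil]
        rw [List.drop_eq_nil_of_le (by omega), List.take_of_length_le (by omega)]
        simp [chunks8]
      · rw [fullChunks, if_neg h8, rem8, if_neg h8]
        rw [ih (l.drop 8) (by simp; omega)]
        simp

lemma B_eq (s1 s2 : String) :
    andStrings_alt s1 s2 =
      String.ofList (PySem.Chars.join ['.']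
        ((chunks8 (pvBits s1.toList s2.toList)).map (fun ch => PySem.Int.toChars (bitVal ch)))) := by
  unfold andStrings_alt
  dsimp only
  have hfold : (List.range s1.toList.length).foldl
      (fun (st : List Int × Int × Nat) (i : Nat) =>
        let acc' := st.2.1 * 2 +
          (if PySem.List.pyGetD s1.toList (i : Int) ' ' = '1' ∧
              PySem.List.pyGetD s2.toList (i : Int) ' ' = '1'
           then 1 else 0)
        let cnt' := st.2.2 + 1
        if cnt' = 8 then (st.1 ++ [acc'], 0, 0) else (st.1, acc', cnt'))
      (([] : List Int), (0 : Int), (0 : Nat))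
      = (pvBits s1.toList s2.toList).foldl stepB ([], 0, 0) := by
    rw [pvBits, List.foldl_map]
    rfl
  rw [hfold]
  rw [show ((([] : List Int), (0 : Int), (0 : Nat)) : List Int × Int × Nat)
      = ([], bitVal [], ([] : List Int).length) from rfl]
  rw [foldB _ [] [] (by norm_num), List.nil_append, List.nil_append]
  rw [chunks8_eq_full (pvBits s1.toList s2.toList).length _ le_rfl]
  by_cases hr : rem8 (pvBits s1.toList s2.toList) = []
  · have h0 : (rem8 (pvBits s1.toList s2.toList)).length = 0 := by rw [hr]; rfl
    simp [hr, List.map_map, Function.comp_def]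
  · have h0 : (rem8 (pvBits s1.toList s2.toList)).length ≠ 0 := by
      simpa [List.length_eq_zero_iff] using hr
    simp [hr, h0, List.map_map, Function.comp_def]

-- ===== VERDICT (by name: the statement is the Claim_ definition above) =====
theorem andStrings_spec : Claim_equal_andStrings := by
  intro s1 s2 _ _
  unfold Spec_andStrings
  rw [A_eq, B_eq]
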